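-- pv_equiv track=rewrite | github.com/SabaJamilan/RIFS-LLVM-Passes | pick_best_ranked_ir_by_speedup.py | find_ir_identifier_column
-- ===== SOURCE A (Python) =====
-- def find_ir_identifier_column(cols):
--     """
--     Try to pick a column that identifies the IR / candidate.
--     """
--     cols_l = [c.lower() for c in cols]
--     candidates = []
--
--     # Strong signals first
--     for key in ["ir_path", "irfile", "ir_file", "ir", "ll", "bitcode", "candidate", "candidateid", "cand", "opt_ir"]:
--         for c, cl in zip(cols, cols_l):
--             if key in cl:
--                 candidates.append(c)
--
--     if candidates:
--         # Prefer paths/files over generic ids if available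
--         for prefer in ["path", "file", "ll", "bc"]:
--             for c in candidates:
--                 if prefer in c.lower():
--                     return c
--         return candidates[0]
--
--     return None
-- ===== SOURCE B (Python) =====
-- KEYS = ["ir_path", "irfile", "ir_file", "ir", "ll", "bitcode", "candidate", "candidateid", "cand", "opt_ir"]
-- PREFS = ["path", "file", "ll", "bc"]
--
-- def find_ir_identifier_column(cols):
--     """
--     Pick the column identifying the IR / candidate: a single pass that
--     selects the column minimizing (pref_rank, keyword_rank, position).
--     """
--     best = None
--     for i, c in enumerate(cols):
--         cl = c.lower()
--         kr = next((j for j, k in enumerate(KEYS) if k in cl), None)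
--         if kr is None:
--             continue
--         pr = next((j for j, p in enumerate(PREFS) if p in cl), len(PREFS))
--         key = (pr, kr, i)
--         if best is None or key < best[0]:
--             best = (key, c)
--     return None if best is None else best[1]
-- ===== Notes on version B (the rewrite author's own statement) =====
-- stated objective: simpler
-- what changed: Replaces A's keyword-major candidate-list construction plus a second multi-phase preference scan with a single pass over the columns that selects the argmin of the priority tuple (pref_rank, keyword_rank, position).
import Mathlib
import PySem

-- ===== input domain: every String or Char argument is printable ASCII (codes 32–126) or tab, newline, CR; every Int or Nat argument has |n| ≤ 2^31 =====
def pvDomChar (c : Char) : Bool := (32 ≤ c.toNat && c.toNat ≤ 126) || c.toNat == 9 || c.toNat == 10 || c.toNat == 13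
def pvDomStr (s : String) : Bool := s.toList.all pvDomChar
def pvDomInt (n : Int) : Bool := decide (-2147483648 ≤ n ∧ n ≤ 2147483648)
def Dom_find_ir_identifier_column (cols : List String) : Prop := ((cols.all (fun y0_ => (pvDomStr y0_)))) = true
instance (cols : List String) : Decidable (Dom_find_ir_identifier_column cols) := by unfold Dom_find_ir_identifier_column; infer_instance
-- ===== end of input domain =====

-- B replaces A's keyword-major candidate-list construction plus multi-phase preference
-- scan with a single pass selecting the argmin of the tuple (pref_rank, keyword_rank, position).

-- ===== PORT A =====
def pvKeys : List String := ["ir_path", "irfile", "ir_file", "ir", "ll", "bitcode", "candidate", "candidateid", "cand", "opt_ir"]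
def pvPrefs : List String := ["path", "file", "ll", "bc"]

def find_ir_identifier_column (cols : List String) : Option String :=
  let colsL := cols.map (fun c => PySem.Str.lower c)
  let candidates : List String :=
    pvKeys.foldl (fun acc key =>
      (cols.zip colsL).foldl (fun acc2 p =>
        if PySem.Str.isIn key p.2 then acc2 ++ [p.1] else acc2) acc) []
  match candidates with
  | [] => none
  | c0 :: _ =>
    match pvPrefs.findSome? (fun prefer =>
        candidates.find? (fun c => PySem.Str.isIn prefer (PySem.Str.lower c))) with
    | some c => some c
    | none => some c0

-- ===== PORT B =====
def pvLexLt (a b : Nat × Nat × Int) : Bool :=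
  a.1 < b.1 || (a.1 == b.1 && (a.2.1 < b.2.1 || (a.2.1 == b.2.1 && a.2.2 < b.2.2)))

def find_ir_identifier_column_alt (cols : List String) : Option String :=
  let best := (PySem.List.enumerate cols 0).foldl
    (fun (best : Option ((Nat × Nat × Int) × String)) p =>
      let cl := PySem.Str.lower p.2
      match pvKeys.findIdx? (fun k => PySem.Str.isIn k cl) with
      | none => best
      | some kr =>
        let pr := (pvPrefs.findIdx? (fun q => PySem.Str.isIn q cl)).getD pvPrefs.length
        let key := (pr, kr, p.1)
        match best with
        | none => some (key, p.2)
        | some b => if pvLexLt key b.1 then some (key, p.2) else best)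
    none
  best.map (fun b => b.2)

-- ===== PRECONDITION & SPEC =====
def Spec_find_ir_identifier_column (cols : List String) (out : Option String) : Prop := out = find_ir_identifier_column_alt cols
instance (cols : List String) (out : Option String) : Decidable (Spec_find_ir_identifier_column cols out) := by unfold Spec_find_ir_identifier_column; infer_instance

-- ===== CLAIM (what is proved, stated in full; the proofs are below) =====
def Claim_equal_find_ir_identifier_column : Prop := ∀ (cols : List String), Dom_find_ir_identifier_column cols → Spec_find_ir_identifier_column cols (find_ir_identifier_column cols)

-- ===== LEMMAS AND PROOFS =====

-- a column c matches the keyword/preference string k (Python: `k in c.lower()`)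
def pvMatch (c k : String) : Bool := PySem.Str.isIn k (PySem.Str.lower c)
-- rank of the first matching keyword / preference of a column
def pvMr (c : String) : Option Nat := pvKeys.findIdx? (fun k => pvMatch c k)
def pvPr (c : String) : Nat := (pvPrefs.findIdx? (fun q => pvMatch c q)).getD pvPrefs.length

-- B's fold step, named so the fold can be reasoned about
def pvStep (best : Option ((Nat × Nat × Int) × String)) (p : Int × String) :
    Option ((Nat × Nat × Int) × String) :=
  match pvMr p.2 with
  | none => best
  | some kr =>
    let key := (pvPr p.2, kr, p.1)
    match best with
    | none => some (key, p.2)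
    | some b => if pvLexLt key b.1 then some (key, p.2) else best

def pvKeyOf (p : Int × String) : Nat × Nat × Int := (pvPr p.2, (pvMr p.2).getD 0, p.1)

-- lexicographic ≤ on (pref_rank, keyword_rank, position), Prop form
def pvLe (a b : Nat × Nat × Nat) : Prop :=
  a.1 < b.1 ∨ (a.1 = b.1 ∧ (a.2.1 < b.2.1 ∨ (a.2.1 = b.2.1 ∧ a.2.2 ≤ b.2.2)))

-- "index i holds the best-ranked matched column"
def pvBest (cols : List String) (i : Nat) : Prop :=
  ∃ h : i < cols.length, (pvMr cols[i]).isSome ∧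
    ∀ j (hj : j < cols.length), (pvMr cols[j]).isSome →
      pvLe (pvPr cols[i], (pvMr cols[i]).getD 0, i) (pvPr cols[j], (pvMr cols[j]).getD 0, j)

-- A's result in nested-first-match normal form
def pvNf (cols : List String) : Option String :=
  (pvPrefs.findSome? (fun q => pvKeys.findSome? (fun k =>
      cols.find? (fun c => pvMatch c k && pvMatch c q)))).or
  (pvKeys.findSome? (fun k => cols.find? (fun c => pvMatch c k)))

lemma pvLexLt_irrefl (a : Nat × Nat × Int) : pvLexLt a a = false := by
  obtain ⟨a1, a2, a3⟩ := a; simp [pvLexLt]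

lemma pvLexLt_false_trans {x y z : Nat × Nat × Int}
    (h1 : pvLexLt x y = false) (h2 : pvLexLt y z = false) : pvLexLt x z = false := by
  obtain ⟨x1, x2, x3⟩ := x; obtain ⟨y1, y2, y3⟩ := y; obtain ⟨z1, z2, z3⟩ := z
  simp [pvLexLt] at *; omega

lemma pvLexLt_false_of_true {x y z : Nat × Nat × Int}
    (h1 : pvLexLt x y = true) (h2 : pvLexLt x z = false) : pvLexLt y z = false := by
  obtain ⟨x1, x2, x3⟩ := x; obtain ⟨y1, y2, y3⟩ := y; obtain ⟨z1, z2, z3⟩ := z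
  simp [pvLexLt] at *; omega

lemma pvLexLt_false_nat_iff (x1 x2 y1 y2 i j : Nat) :
    pvLexLt (x1, x2, (j : Int)) (y1, y2, (i : Int)) = false ↔ pvLe (y1, y2, i) (x1, x2, j) := by
  simp [pvLexLt, pvLe]; omega

lemma pvMr_eq_none_iff (c : String) : pvMr c = none ↔ ∀ k ∈ pvKeys, pvMatch c k = false :=
  List.findIdx?_eq_none_iff

lemma findSome?_eq_some_iff_index {α β : Type} (f : α → Option β) (l : List α) (b : β) :
    l.findSome? f = some b ↔
      ∃ i, ∃ h : i < l.length, f l[i] = some b ∧ ∀ j (hj : j < i), f l[j] = none := by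
  induction l with
  | nil => simp
  | cons x xs ih =>
    rw [List.findSome?_cons]
    cases hx : f x with
    | some v =>
      constructor
      · intro hv; exact ⟨0, by simp, by simpa [hv] using hx, by omega⟩
      · rintro ⟨i, h, hf, hprev⟩
        cases i with
        | zero => simp [hx] at hf; simp [hf]
        | succ n => have := hprev 0 (by omega); simp [hx] at this
    | none =>
      simp only [ih]
      constructor
      · rintro ⟨i, h, hf, hprev⟩
        exact ⟨i + 1, by simpa using h, by simpa using hf, by
          intro j hj; cases j with
          | zero => simpa using hx
          | succ m => simpa using hprev m (by omega)⟩
      · rintro ⟨i, h, hf, hprev⟩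
        cases i with
        | zero => simp [hx] at hf
        | succ n =>
          exact ⟨n, by simpa using h, by simpa using hf, fun j hj => by
            simpa using hprev (j + 1) (by omega)⟩

lemma pvCandidates_eq (cols : List String) :
    pvKeys.foldl (fun acc key =>
      (cols.zip (cols.map (fun c => PySem.Str.lower c))).foldl (fun acc2 p =>
        if PySem.Str.isIn key p.2 then acc2 ++ [p.1] else acc2) acc) []
    = pvKeys.flatMap (fun k => cols.filter (fun c => pvMatch c k)) := by
  have hzip : cols.zip (cols.map (fun c => PySem.Str.lower c))
      = cols.map (fun c => (c, PySem.Str.lower c)) := by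
    induction cols with
    | nil => simp
    | cons x xs ih => simp [ih]
  have hinner : ∀ (key : String) (acc : List String),
      (cols.zip (cols.map (fun c => PySem.Str.lower c))).foldl (fun acc2 p =>
        if PySem.Str.isIn key p.2 then acc2 ++ [p.1] else acc2) acc
      = acc ++ cols.filter (fun c => pvMatch c key) := by
    intro key acc
    rw [hzip, List.foldl_map]
    have := PySem.List.foldl_append_if (fun c => pvMatch c key) (fun c => c) cols acc
    simpa [pvMatch] using this
  calc pvKeys.foldl (fun acc key =>
      (cols.zip (cols.map (fun c => PySem.Str.lower c))).foldl (fun acc2 p =>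
        if PySem.Str.isIn key p.2 then acc2 ++ [p.1] else acc2) acc) []
      = pvKeys.foldl (fun acc key => acc ++ cols.filter (fun c => pvMatch c key)) [] := by
        exact PySem.List.foldl_congr_mem pvKeys _ _ [] (fun acc key _ => hinner key acc)
    _ = _ := by
        simpa using PySem.List.foldl_append_eq_flatMap (fun k => cols.filter (fun c => pvMatch c k)) pvKeys []
lemma find?_flatMap_filter (cols : List String) (ks : List String) (p : String → Bool) :
    (ks.flatMap (fun k => cols.filter (fun c => pvMatch c k))).find? p
    = ks.findSome? (fun k => cols.find? (fun c => pvMatch c k && p c)) := by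
  induction ks with
  | nil => simp
  | cons k ks ih =>
    rw [List.flatMap_cons, List.find?_append, List.find?_filter, List.findSome?_cons]
    cases hf : cols.find? (fun c => pvMatch c k && p c) with
    | some v => simp [hf]
    | none => simp [hf, ih]

lemma head?_flatMap_filter (cols : List String) (ks : List String) :
    (ks.flatMap (fun k => cols.filter (fun c => pvMatch c k))).head?
    = ks.findSome? (fun k => cols.find? (fun c => pvMatch c k)) := by
  induction ks with
  | nil => simp
  | cons k ks ih =>
    rw [List.flatMap_cons, List.head?_append, List.findSome?_cons, List.head?_filter]
    cases hf : cols.find? (fun c => pvMatch c k) <;> simp [hf, ih]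

lemma pvA_eq_nf (cols : List String) : find_ir_identifier_column cols = pvNf cols := by
  unfold find_ir_identifier_column
  simp only []
  rw [pvCandidates_eq]
  set cand := pvKeys.flatMap (fun k => cols.filter (fun c => pvMatch c k)) with hcand
  have hps : pvPrefs.findSome? (fun prefer =>
        cand.find? (fun c => PySem.Str.isIn prefer (PySem.Str.lower c)))
      = pvPrefs.findSome? (fun q => pvKeys.findSome? (fun k =>
        cols.find? (fun c => pvMatch c k && pvMatch c q))) := by
    have h1 : ∀ q : String, cand.find? (fun c => PySem.Str.isIn q (PySem.Str.lower c))
        = pvKeys.findSome? (fun k => cols.find? (fun c => pvMatch c k && pvMatch c q)) := by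
      intro q; rw [hcand, find?_flatMap_filter]; rfl
    simp only [h1]
  cases hc : cand with
  | nil =>
    have hall : ∀ k ∈ pvKeys, cols.find? (fun c => pvMatch c k) = none := by
      intro k hk
      rw [List.find?_eq_none]
      intro x hx hpx
      have : x ∈ cand := by
        rw [hcand]; exact List.mem_flatMap.mpr ⟨k, hk, List.mem_filter.mpr ⟨hx, hpx⟩⟩
      simp [hc] at this
    have h2 : ∀ q ∈ pvPrefs, pvKeys.findSome? (fun k =>
        cols.find? (fun c => pvMatch c k && pvMatch c q)) = none := by
      intro q _
      rw [List.findSome?_eq_none_iff]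
      intro k hk
      rw [List.find?_eq_none]
      intro x hx hpx
      have hone : pvMatch x k = true := by simp at hpx; exact hpx.1
      have : x ∈ cand := by
        rw [hcand]; exact List.mem_flatMap.mpr ⟨k, hk, List.mem_filter.mpr ⟨hx, hone⟩⟩
      simp [hc] at this
    unfold pvNf
    rw [List.findSome?_eq_none_iff.mpr h2, List.findSome?_eq_none_iff.mpr hall]
    rfl
  | cons c0 rest =>
    have hhead : cand.head? = some c0 := by rw [hc]; rfl
    unfold pvNf
    rw [← hps]
    rw [hc]
    cases hx : pvPrefs.findSome? (fun prefer =>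
        (c0 :: rest).find? (fun c => PySem.Str.isIn prefer (PySem.Str.lower c))) with
    | some v => simp
    | none =>
      simp only [Option.or]
      rw [← head?_flatMap_filter, ← hcand, hhead]

lemma pvNf_none (cols : List String) (h : pvNf cols = none) :
    ∀ c ∈ cols, pvMr c = none := by
  intro c hc
  unfold pvNf at h
  rcases Option.or_eq_none_iff.mp h with ⟨-, h2⟩
  rw [pvMr_eq_none_iff]
  intro k hk
  have h3 := List.find?_eq_none.mp (List.findSome?_eq_none_iff.mp h2 k hk) c hc
  simpa using h3

-- facts packaged from pvPr / pvMr being a first-match index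
lemma pvPr_spec (y : String) (h : pvPr y < pvPrefs.length) :
    ∃ hh : pvPr y < pvPrefs.length, pvMatch y (pvPrefs[pvPr y]'hh) = true ∧
      ∀ q' (hq' : q' < pvPrefs.length), q' < pvPr y → pvMatch y (pvPrefs[q']'hq') = false := by
  cases hf : pvPrefs.findIdx? (fun q => pvMatch y q) with
  | none =>
    exfalso
    unfold pvPr at h
    rw [hf] at h
    simp at h
  | some q =>
    have hpv : pvPr y = q := by unfold pvPr; rw [hf]; rfl
    obtain ⟨hq, hm, hprev⟩ := List.findIdx?_eq_some_iff_getElem.mp hf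
    refine ⟨h, ?_, ?_⟩
    · simp only [hpv]
      exact hm
    · intro q' hq' hlt
      have := hprev q' (by omega)
      simpa using this

lemma pvMr_spec (y : String) (kj : Nat) (h : pvMr y = some kj) :
    ∃ hh : kj < pvKeys.length, pvMatch y (pvKeys[kj]'hh) = true := by
  obtain ⟨hk, hm, -⟩ := List.findIdx?_eq_some_iff_getElem.mp h
  exact ⟨hk, hm⟩

set_option maxHeartbeats 1000000 in
lemma pvNf_some (cols : List String) (c : String) (h : pvNf cols = some c) :
    ∃ i, ∃ hi : i < cols.length, cols[i] = c ∧ pvBest cols i := by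
  unfold pvNf at h
  cases hP : pvPrefs.findSome? (fun q => pvKeys.findSome? (fun k =>
      cols.find? (fun c => pvMatch c k && pvMatch c q))) with
  | some c' =>
    rw [hP] at h
    have hcc : c' = c := by simpa using h
    subst hcc
    obtain ⟨qi, hqi, hinner, hqprev⟩ := (findSome?_eq_some_iff_index _ _ _).mp hP
    obtain ⟨ki, hki, hfind, hkprev⟩ := (findSome?_eq_some_iff_index _ _ _).mp hinner
    obtain ⟨hpb, i, hi, hie, hiprev⟩ := List.find?_eq_some_iff_getElem.mp hfind
    have hmK : pvMatch c' (pvKeys[ki]'hki) = true := by simp at hpb; exact hpb.1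
    have hmP : pvMatch c' (pvPrefs[qi]'hqi) = true := by simp at hpb; exact hpb.2
    have hcmem : c' ∈ cols := hie ▸ List.getElem_mem hi
    have hmr : pvMr c' = some ki := by
      apply List.findIdx?_eq_some_iff_getElem.mpr
      refine ⟨hki, hmK, ?_⟩
      intro j hj
      have h4 := List.find?_eq_none.mp (hkprev j (by omega)) c' hcmem
      simp only [Bool.and_eq_true, not_and] at h4
      intro hcon
      exact h4 hcon hmP
    have hprq : pvPrefs.findIdx? (fun q => pvMatch c' q) = some qi := by
      apply List.findIdx?_eq_some_iff_getElem.mpr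
      refine ⟨hqi, hmP, ?_⟩
      intro q' hq'
      have h5 := List.findSome?_eq_none_iff.mp (hqprev q' (by omega)) (pvKeys[ki]'hki)
        (List.getElem_mem hki)
      have h6 := List.find?_eq_none.mp h5 c' hcmem
      simp only [Bool.and_eq_true, not_and] at h6
      intro hcon
      exact h6 hmK hcon
    have hpr : pvPr c' = qi := by unfold pvPr; rw [hprq]; rfl
    refine ⟨i, hi, hie, hi, by rw [hie, hmr]; rfl, ?_⟩
    intro j hj hjm
    obtain ⟨kj, hkj⟩ := Option.isSome_iff_exists.mp hjm
    obtain ⟨hkjl, hmKj⟩ := pvMr_spec cols[j] kj hkj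
    have hymem : cols[j] ∈ cols := List.getElem_mem hj
    -- claim 1 : qi ≤ pvPr cols[j]
    have c1 : qi ≤ pvPr cols[j] := by
      by_contra hcon
      push Not at hcon
      have hlt : pvPr cols[j] < pvPrefs.length := by omega
      obtain ⟨hh, hmPy, -⟩ := pvPr_spec cols[j] hlt
      have hmPy : pvMatch cols[j] (pvPrefs[pvPr cols[j]]'hh) = true := hmPy
      have h5 := List.findSome?_eq_none_iff.mp (hqprev (pvPr cols[j]) hcon)
        (pvKeys[kj]'hkjl) (List.getElem_mem hkjl)
      have h6 := List.find?_eq_none.mp h5 cols[j] hymem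
      simp only [Bool.and_eq_true, not_and] at h6
      exact h6 hmKj hmPy
    -- matched preference at qi, if the ranks tie
    have hPy_of_eq : pvPr cols[j] = qi → pvMatch cols[j] (pvPrefs[qi]'hqi) = true := by
      intro heq
      obtain ⟨hh, hmPy, -⟩ := pvPr_spec cols[j] (by omega)
      have : (pvPrefs[pvPr cols[j]]'hh) = (pvPrefs[qi]'hqi) := by congr 1
      rwa [this] at hmPy
    -- claim 2 : on pref tie, ki ≤ kj
    have c2 : pvPr cols[j] = qi → ki ≤ kj := by
      intro heq
      by_contra hcon
      push Not at hcon
      have h5 := List.find?_eq_none.mp (hkprev kj hcon) cols[j] hymem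
      simp only [Bool.and_eq_true, not_and] at h5
      exact h5 hmKj (hPy_of_eq heq)
    -- claim 3 : on full tie, i ≤ j
    have c3 : pvPr cols[j] = qi → kj = ki → i ≤ j := by
      intro heq hke
      by_contra hcon
      push Not at hcon
      have h5 := hiprev j hcon
      simp only [Bool.not_eq_eq_eq_not, Bool.not_true, Bool.and_eq_false_iff] at h5
      have hmKi : pvMatch cols[j] (pvKeys[ki]'hki) = true := by
        have : (pvKeys[kj]'hkjl) = (pvKeys[ki]'hki) := by congr 1
        rwa [this] at hmKj
      rcases h5 with h5 | h5
      · rw [hmKi] at h5; cases h5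
      · rw [hPy_of_eq heq] at h5; cases h5
    rw [hie, hmr, hpr, hkj]
    simp only [Option.getD_some]
    unfold pvLe
    simp only []
    omega
  | none =>
    rw [hP] at h
    rw [Option.none_or] at h
    obtain ⟨ki, hki, hfind, hkprev⟩ := (findSome?_eq_some_iff_index _ _ _).mp h
    obtain ⟨hmK, i, hi, hie, hiprev⟩ := List.find?_eq_some_iff_getElem.mp hfind
    have hcmem : c ∈ cols := hie ▸ List.getElem_mem hi
    have hmr : pvMr c = some ki := by
      apply List.findIdx?_eq_some_iff_getElem.mpr
      refine ⟨hki, hmK, ?_⟩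
      intro j hj
      exact List.find?_eq_none.mp (hkprev j (by omega)) c hcmem
    -- every matched column has no preference match at all
    have hall4 : ∀ y ∈ cols, (pvMr y).isSome → pvPr y = pvPrefs.length := by
      intro y hy hym
      obtain ⟨kj, hkj⟩ := Option.isSome_iff_exists.mp hym
      obtain ⟨hkjl, hmKj⟩ := pvMr_spec y kj hkj
      unfold pvPr
      cases hf : pvPrefs.findIdx? (fun q => pvMatch y q) with
      | none => rfl
      | some q' =>
        obtain ⟨hq', hmPy, -⟩ := List.findIdx?_eq_some_iff_getElem.mp hf
        have h5 := List.findSome?_eq_none_iff.mp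
          (List.findSome?_eq_none_iff.mp hP (pvPrefs[q']'hq') (List.getElem_mem hq'))
          (pvKeys[kj]'hkjl) (List.getElem_mem hkjl)
        have h6 := List.find?_eq_none.mp h5 y hy
        simp only [Bool.and_eq_true, not_and] at h6
        exact absurd hmPy (h6 hmKj)
    refine ⟨i, hi, hie, hi, by rw [hie, hmr]; rfl, ?_⟩
    intro j hj hjm
    obtain ⟨kj, hkj⟩ := Option.isSome_iff_exists.mp hjm
    obtain ⟨hkjl, hmKj⟩ := pvMr_spec cols[j] kj hkj
    have hymem : cols[j] ∈ cols := List.getElem_mem hj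
    have hprc : pvPr c = pvPrefs.length := hall4 c hcmem (by simp [hmr])
    have hprj : pvPr cols[j] = pvPrefs.length := hall4 cols[j] hymem hjm
    have c2 : ki ≤ kj := by
      by_contra hcon
      push Not at hcon
      exact absurd hmKj (by simpa using List.find?_eq_none.mp (hkprev kj hcon) cols[j] hymem)
    have c3 : kj = ki → i ≤ j := by
      intro hke
      by_contra hcon
      push Not at hcon
      have h5 := hiprev j hcon
      have hmKi : pvMatch cols[j] (pvKeys[ki]'hki) = true := by
        have : (pvKeys[kj]'hkjl) = (pvKeys[ki]'hki) := by congr 1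
        rwa [this] at hmKj
      rw [hmKi] at h5; cases h5
    rw [hie, hmr, hkj, hprc, hprj]
    simp only [Option.getD_some]
    unfold pvLe
    simp only []
    exact Or.inr ⟨trivial, by omega⟩

lemma pvFold_spec (l : List (Int × String)) (acc : Option ((Nat × Nat × Int) × String)) :
    (l.foldl pvStep acc = none ↔ (acc = none ∧ ∀ p ∈ l, pvMr p.2 = none))
    ∧ (∀ r, l.foldl pvStep acc = some r →
        ((acc = some r ∨ ∃ p ∈ l, pvMr p.2 ≠ none ∧ r = (pvKeyOf p, p.2))
        ∧ (∀ p ∈ l, pvMr p.2 ≠ none → pvLexLt (pvKeyOf p) r.1 = false)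
        ∧ (∀ b, acc = some b → pvLexLt b.1 r.1 = false))) := by
  induction l generalizing acc with
  | nil =>
    refine ⟨by simp, ?_⟩
    intro r h
    simp only [List.foldl_nil] at h
    refine ⟨Or.inl h, by simp, ?_⟩
    intro b hb
    rw [h] at hb
    cases hb
    exact pvLexLt_irrefl r.1
  | cons p l ih =>
    rw [List.foldl_cons]
    cases hm : pvMr p.2 with
    | none =>
      have hstep : pvStep acc p = acc := by simp [pvStep, hm]
      rw [hstep]
      obtain ⟨ih1, ih2⟩ := ih acc
      refine ⟨?_, ?_⟩
      · rw [ih1]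
        constructor
        · rintro ⟨ha, hall⟩
          exact ⟨ha, by intro q hq; rcases List.mem_cons.mp hq with rfl | hq'; exact hm; exact hall q hq'⟩
        · rintro ⟨ha, hall⟩
          exact ⟨ha, fun q hq => hall q (List.mem_cons_of_mem _ hq)⟩
      · intro r hr
        obtain ⟨prov, hmin, haccr⟩ := ih2 r hr
        refine ⟨?_, ?_, haccr⟩
        · rcases prov with h | ⟨q, hq, hx⟩
          · exact Or.inl h
          · exact Or.inr ⟨q, List.mem_cons_of_mem _ hq, hx⟩
        · intro q hq hqm
          rcases List.mem_cons.mp hq with rfl | hq'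
          · exact absurd hm hqm
          · exact hmin q hq' hqm
    | some kr =>
      have hkey : pvKeyOf p = (pvPr p.2, kr, p.1) := by simp [pvKeyOf, hm]
      -- the accumulator after the head step
      have hstep : ∃ a', pvStep acc p = some a' ∧
          pvLexLt (pvKeyOf p) a'.1 = false ∧
          (a' = (pvKeyOf p, p.2) ∨ acc = some a') ∧
          (∀ b, acc = some b → pvLexLt b.1 a'.1 = false ∨ a' = b) := by
        cases acc with
        | none =>
          refine ⟨(pvKeyOf p, p.2), by simp [pvStep, hm, hkey], by simpa using pvLexLt_irrefl (pvKeyOf p), Or.inl rfl, by simp⟩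
        | some b =>
          by_cases hlt : pvLexLt (pvPr p.2, kr, p.1) b.1 = true
          · refine ⟨(pvKeyOf p, p.2), by simp [pvStep, hm, hkey, hlt], by simpa using pvLexLt_irrefl (pvKeyOf p), Or.inl rfl, ?_⟩
            rintro b' hb
            injection hb with hbe
            subst hbe
            rw [hkey]
            exact Or.inl (by
              have := pvLexLt_false_of_true (x := (pvPr p.2, kr, p.1)) hlt (pvLexLt_irrefl _)
              simpa using this)
          · have hlt' : pvLexLt (pvKeyOf p) b.1 = false := by rw [hkey]; simpa using hlt
            refine ⟨b, by simp [pvStep, hm]; intro hc; rw [hkey] at hlt'; simp [hc] at hlt', hlt', Or.inr rfl, ?_⟩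
            rintro b' hb
            injection hb with hbe
            subst hbe
            exact Or.inr rfl
      obtain ⟨a', ha', hale, hprov0, haccrel0⟩ := hstep
      rw [ha']
      obtain ⟨ih1, ih2⟩ := ih (some a')
      refine ⟨?_, ?_⟩
      · constructor
        · intro h
          rcases ih1.mp h with ⟨h2, -⟩; cases h2
        · rintro ⟨-, hall⟩
          exact absurd (hall p List.mem_cons_self) (by simp [hm])
      · intro r hr
        obtain ⟨prov, hmin, haccr⟩ := ih2 r hr
        have hra' : pvLexLt a'.1 r.1 = false := haccr a' rfl
        refine ⟨?_, ?_, ?_⟩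
        · rcases prov with h | ⟨q, hq, hx⟩
          · cases h
            rcases hprov0 with h2 | h2
            · exact Or.inr ⟨p, List.mem_cons_self, by simp [hm], h2⟩
            · exact Or.inl h2
          · exact Or.inr ⟨q, List.mem_cons_of_mem _ hq, hx⟩
        · intro q hq hqm
          rcases List.mem_cons.mp hq with rfl | hq'
          · exact pvLexLt_false_trans hale hra'
          · exact hmin q hq' hqm
        · intro b hb
          rcases haccrel0 b hb with h2 | h2
          · exact pvLexLt_false_trans h2 hra'
          · rw [← h2]; exact hra'

lemma pvAlt_eq (cols : List String) :
    find_ir_identifier_column_alt cols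
      = ((PySem.List.enumerate cols 0).foldl pvStep none).map (fun b => b.2) := rfl

lemma pvAlt_none (cols : List String) (h : find_ir_identifier_column_alt cols = none) :
    ∀ c ∈ cols, pvMr c = none := by
  intro c hc
  rw [pvAlt_eq] at h
  have hfold : (PySem.List.enumerate cols 0).foldl pvStep none = none := by
    cases hx : (PySem.List.enumerate cols 0).foldl pvStep none with
    | none => rfl
    | some r => rw [hx] at h; simp at h
  have hall := ((pvFold_spec _ none).1.mp hfold).2
  obtain ⟨k, hk, rfl⟩ := List.mem_iff_getElem.mp hc
  exact hall ((0 : Int) + k, cols[k]) ((PySem.List.mem_enumerate_iff _ _ _).mpr ⟨k, hk, rfl⟩)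

lemma pvAlt_some (cols : List String) (c : String) (h : find_ir_identifier_column_alt cols = some c) :
    ∃ i, ∃ hi : i < cols.length, cols[i] = c ∧ pvBest cols i := by
  rw [pvAlt_eq] at h
  obtain ⟨r, hr, hrc⟩ := Option.map_eq_some_iff.mp h
  obtain ⟨prov, hmin, -⟩ := (pvFold_spec _ none).2 r hr
  rcases prov with h' | ⟨p, hp, hpm, rfl⟩
  · cases h'
  obtain ⟨k, hk, rfl⟩ := (PySem.List.mem_enumerate_iff _ _ _).mp hp
  refine ⟨k, hk, by simpa using hrc, hk, Option.ne_none_iff_isSome.mp (by simpa using hpm), ?_⟩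
  intro j hj hjm
  have hpj : ((0 : Int) + j, cols[j]) ∈ PySem.List.enumerate cols 0 :=
    (PySem.List.mem_enumerate_iff _ _ _).mpr ⟨j, hj, rfl⟩
  have hlt := hmin _ hpj (by simpa using Option.ne_none_iff_isSome.mpr hjm)
  have : pvLexLt (pvPr cols[j], (pvMr cols[j]).getD 0, (j : Int))
      (pvPr cols[k], (pvMr cols[k]).getD 0, (k : Int)) = false := by
    simpa [pvKeyOf] using hlt
  exact (pvLexLt_false_nat_iff _ _ _ _ _ _).mp this

lemma pvBest_unique (cols : List String) (i j : Nat) (hi : pvBest cols i) (hj : pvBest cols j) : i = j := by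
  obtain ⟨h1, hm1, hall1⟩ := hi
  obtain ⟨h2, hm2, hall2⟩ := hj
  have a := hall1 j h2 hm2
  have b := hall2 i h1 hm1
  simp [pvLe] at a b
  omega

-- ===== VERDICT (by name: the statement is the Claim_ definition above) =====
theorem find_ir_identifier_column_spec : Claim_equal_find_ir_identifier_column := by
  intro cols _
  unfold Spec_find_ir_identifier_column
  rw [pvA_eq_nf]
  cases hA : pvNf cols with
  | none =>
    cases hB : find_ir_identifier_column_alt cols with
    | none => rfl
    | some c =>
      obtain ⟨i, hi, hic, ⟨_, hm, _⟩⟩ := pvAlt_some cols c hB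
      have := pvNf_none cols hA cols[i] (List.getElem_mem hi)
      simp [this] at hm
  | some c =>
    obtain ⟨i, hi, hic, hbi⟩ := pvNf_some cols c hA
    cases hB : find_ir_identifier_column_alt cols with
    | none =>
      obtain ⟨hi', hm, _⟩ := hbi
      have := pvAlt_none cols hB cols[i] (List.getElem_mem hi)
      simp [this] at hm
    | some c' =>
      obtain ⟨j, hj, hjc, hbj⟩ := pvAlt_some cols c' hB
      have := pvBest_unique cols i j hbi hbj
      subst this
      rw [← hic, ← hjc]
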